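-- pv_equiv track=rewrite | github.com/JBaijens/PE_prediction | clinvar_mutations_to_PE_fasta.py | insertion_edits
-- ===== SOURCE A (Python) =====
-- def insertion_edits(mut, hel, pos):
--     #Used to convert SPDI format to edit format from DeepPE
--     insertions = {'A', 'C', 'G', 'T', 'AG', 'AGGAA', 'AGGAATCATG'} #Not used right now, could check in place if edit will be predicted.
--     edits = []
--     if mut == '':
--         edit = '+' + str(pos) + ', ' + hel + ' insertion'
--         edits.append(edit)
--         return edits
--     ins_len = len(hel) - len(mut)
--     for i in range(len(hel)):
--         edited = hel[:i] + hel[i+ins_len:]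
--         if edited == mut: # The deleted part in hel should be added in mut to get hel.
--             edit =  '+' + str(pos + i) + ', ' + hel[i:i+ins_len] + ' insertion'
--             edits.append(edit)
--     return edits
-- ===== SOURCE B (Python) =====
-- def insertion_edits(mut, hel, pos):
--     # O(n): common prefix/suffix lengths give the contiguous range of valid deletion starts.
--     if mut == '':
--         return ['+' + str(pos) + ', ' + hel + ' insertion']
--     n, m = len(hel), len(mut)
--     p = 0
--     while p < n and p < m and hel[p] == mut[p]:
--         p += 1
--     s = 0
--     while s < n and s < m and hel[n - 1 - s] == mut[m - 1 - s]:
--         s += 1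
--     lo = max(0, m - s)
--     hi = min(p, n - 1)
--     d = n - m
--     return ['+' + str(pos + i) + ', ' + hel[i:i + d] + ' insertion'
--             for i in range(lo, hi + 1)]
-- ===== Notes on version B (the rewrite author's own statement) =====
-- stated objective: faster
-- what changed: Instead of trying every deletion position and rebuilding/comparing the whole string at each (O(n^2) work), B computes the common-prefix and common-suffix lengths of hel and mut once and emits the contiguous interval of valid deletion starts directly (O(n)).
import Mathlib
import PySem

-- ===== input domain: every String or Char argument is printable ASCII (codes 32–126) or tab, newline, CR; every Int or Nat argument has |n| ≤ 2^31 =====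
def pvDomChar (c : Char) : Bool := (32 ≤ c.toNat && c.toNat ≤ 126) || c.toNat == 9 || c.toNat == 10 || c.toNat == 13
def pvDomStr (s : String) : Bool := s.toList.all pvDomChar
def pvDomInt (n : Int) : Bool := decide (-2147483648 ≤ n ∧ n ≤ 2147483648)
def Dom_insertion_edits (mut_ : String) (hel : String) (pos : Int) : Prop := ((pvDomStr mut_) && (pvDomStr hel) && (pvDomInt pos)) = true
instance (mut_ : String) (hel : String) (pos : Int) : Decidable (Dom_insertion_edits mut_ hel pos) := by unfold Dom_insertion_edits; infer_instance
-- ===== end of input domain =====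

-- B replaces A's quadratic try-every-position scan by one common-prefix/common-suffix
-- computation that yields the contiguous interval of valid deletion starts (objective: faster, O(n) instead of O(n^2)).

-- ===== PORT A =====
-- literal port of A: for each i in range(len(hel)), delete hel[i:i+ins_len] and compare with mut
def insertion_edits (mut_ : String) (hel : String) (pos : Int) : List String :=
  if mut_ = "" then
    ["+" ++ PySem.Int.toStr pos ++ ", " ++ hel ++ " insertion"]
  else
    let insLen : Int := PySem.Str.len hel - PySem.Str.len mut_
    (PySem.List.pyRange 0 (PySem.Str.len hel)).foldl
      (fun edits i =>
        if PySem.Str.slice hel none (some i) ++ PySem.Str.slice hel (some (i + insLen)) none == mut_ then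
          edits ++ ["+" ++ PySem.Int.toStr (pos + i) ++ ", " ++
                    PySem.Str.slice hel (some i) (some (i + insLen)) ++ " insertion"]
        else edits) []

-- ===== PORT B =====
-- port of B's first while loop: p = 0; while p < len(hel) and p < len(mut) and hel[p] == mut[p]: p += 1
def pvLcpGo (xs ys : List Char) (k : Nat) : Nat :=
  if h : k < xs.length ∧ k < ys.length ∧ xs[k]? = ys[k]? then pvLcpGo xs ys (k + 1) else k
termination_by xs.length - k
decreasing_by omega

-- port of B's second while loop: s = 0; while s < n and s < m and hel[n-1-s] == mut[m-1-s]: s += 1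
def pvLcsGo (xs ys : List Char) (s : Nat) : Nat :=
  if h : s < xs.length ∧ s < ys.length ∧ xs[xs.length - 1 - s]? = ys[ys.length - 1 - s]? then
    pvLcsGo xs ys (s + 1)
  else s
termination_by xs.length - s
decreasing_by omega

def insertion_edits_alt (mut_ : String) (hel : String) (pos : Int) : List String :=
  if mut_ = "" then
    ["+" ++ PySem.Int.toStr pos ++ ", " ++ hel ++ " insertion"]
  else
    let n : Int := PySem.Str.len hel
    let m : Int := PySem.Str.len mut_
    let p : Int := pvLcpGo hel.toList mut_.toList 0
    let s : Int := pvLcsGo hel.toList mut_.toList 0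
    let lo : Int := max 0 (m - s)
    let hi : Int := min p (n - 1)
    let d : Int := n - m
    (PySem.List.pyRange lo (hi + 1)).map
      (fun i => "+" ++ PySem.Int.toStr (pos + i) ++ ", " ++
                PySem.Str.slice hel (some i) (some (i + d)) ++ " insertion")

-- ===== PRECONDITION & SPEC =====
def Spec_insertion_edits (mut_ : String) (hel : String) (pos : Int) (out : List String) : Prop := out = insertion_edits_alt mut_ hel pos
instance (mut_ : String) (hel : String) (pos : Int) (out : List String) : Decidable (Spec_insertion_edits mut_ hel pos out) := by unfold Spec_insertion_edits; infer_instance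

-- ===== CLAIM (what is proved, stated in full; the proofs are below) =====
def Claim_equal_insertion_edits : Prop := ∀ (mut_ : String) (hel : String) (pos : Int), Dom_insertion_edits mut_ hel pos → Spec_insertion_edits mut_ hel pos (insertion_edits mut_ hel pos)

-- ===== LEMMAS AND PROOFS =====

-- clean structural recursion the two scan loops compute
def pvLcp : List Char → List Char → Nat
  | a :: as, b :: bs => if a = b then pvLcp as bs + 1 else 0
  | _, _ => 0

theorem pvLcpGo_eq (xs ys : List Char) (k : Nat) :
    pvLcpGo xs ys k = k + pvLcp (xs.drop k) (ys.drop k) := by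
  
  induction k using pvLcpGo.induct xs ys with
  | case1 k h ih =>
    obtain ⟨h1, h2, h3⟩ := h
    rw [pvLcpGo, dif_pos ⟨h1, h2, h3⟩, ih]
    have hg : xs[k] = ys[k] := by
      rw [List.getElem?_eq_getElem h1, List.getElem?_eq_getElem h2] at h3
      exact Option.some.inj h3
    rw [List.drop_eq_getElem_cons h1, List.drop_eq_getElem_cons h2]
    show k + 1 + pvLcp (xs.drop (k+1)) (ys.drop (k+1)) = k + (if xs[k] = ys[k] then pvLcp (xs.drop (k+1)) (ys.drop (k+1)) + 1 else 0)
    rw [if_pos hg]; omega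
  | case2 k h =>
    rw [pvLcpGo, dif_neg h]
    have hz : pvLcp (xs.drop k) (ys.drop k) = 0 := by
      by_cases h1 : k < xs.length
      · by_cases h2 : k < ys.length
        · have h3 : xs[k]? ≠ ys[k]? := fun he => h ⟨h1, h2, he⟩
          have hg : xs[k] ≠ ys[k] := by
            intro he; apply h3
            rw [List.getElem?_eq_getElem h1, List.getElem?_eq_getElem h2, he]
          rw [List.drop_eq_getElem_cons h1, List.drop_eq_getElem_cons h2]
          show (if xs[k] = ys[k] then pvLcp (xs.drop (k+1)) (ys.drop (k+1)) + 1 else 0) = 0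
          rw [if_neg hg]
        · rw [List.drop_eq_nil_of_le (by omega : ys.length ≤ k)]
          cases xs.drop k <;> rfl
      · rw [List.drop_eq_nil_of_le (by omega : xs.length ≤ k)]
        rfl
    omega

theorem pvLcsGo_eq (xs ys : List Char) (k : Nat) :
    pvLcsGo xs ys k = pvLcpGo xs.reverse ys.reverse k := by
  
  induction k using pvLcsGo.induct xs ys with
  | case1 s h ih =>
    obtain ⟨h1, h2, h3⟩ := h
    have hcond : s < xs.reverse.length ∧ s < ys.reverse.length ∧
        xs.reverse[s]? = ys.reverse[s]? := by
      refine ⟨by simpa using h1, by simpa using h2, ?_⟩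
      rw [List.getElem?_reverse h1, List.getElem?_reverse h2]
      exact h3
    rw [pvLcsGo, dif_pos ⟨h1, h2, h3⟩, ih]
    rw [show pvLcpGo xs.reverse ys.reverse s = pvLcpGo xs.reverse ys.reverse (s + 1) by
      rw [pvLcpGo, dif_pos hcond]]
  | case2 s h =>
    have hcond : ¬ (s < xs.reverse.length ∧ s < ys.reverse.length ∧
        xs.reverse[s]? = ys.reverse[s]?) := by
      intro hx
      obtain ⟨h1, h2, h3⟩ := hx
      apply h
      have h1' : s < xs.length := by simpa using h1
      have h2' : s < ys.length := by simpa using h2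
      refine ⟨h1', h2', ?_⟩
      rw [← List.getElem?_reverse h1', ← List.getElem?_reverse h2']
      exact h3
    rw [pvLcsGo, dif_neg h, pvLcpGo, dif_neg hcond]

theorem pvLcp_le_left (xs ys : List Char) : pvLcp xs ys ≤ xs.length := by
  
  induction xs generalizing ys with
  | nil => cases ys <;> simp [pvLcp]
  | cons a as ih =>
    cases ys with
    | nil => simp [pvLcp]
    | cons b bs =>
      show (if a = b then pvLcp as bs + 1 else 0) ≤ as.length + 1
      split
      · have := ih bs; omega
      · omega

theorem pvLcp_le_right (xs ys : List Char) : pvLcp xs ys ≤ ys.length := by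
  
  induction xs generalizing ys with
  | nil => cases ys <;> simp [pvLcp]
  | cons a as ih =>
    cases ys with
    | nil => simp [pvLcp]
    | cons b bs =>
      show (if a = b then pvLcp as bs + 1 else 0) ≤ bs.length + 1
      split
      · have := ih bs; omega
      · omega

theorem take_pvLcp (xs ys : List Char) : xs.take (pvLcp xs ys) = ys.take (pvLcp xs ys) := by
  
  induction xs generalizing ys with
  | nil => cases ys <;> simp [pvLcp]
  | cons a as ih =>
    cases ys with
    | nil => simp [pvLcp]
    | cons b bs =>
      show List.take (if a = b then pvLcp as bs + 1 else 0) (a :: as) = List.take (if a = b then pvLcp as bs + 1 else 0) (b :: bs)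
      split
      · next hab => simp [List.take_succ_cons, hab, ih bs]
      · simp

theorem take_eq_of_le_pvLcp {xs ys : List Char} {t : Nat} (h : t ≤ pvLcp xs ys) :
    xs.take t = ys.take t := by
  
  have h2 := congrArg (List.take t) (take_pvLcp xs ys)
  simpa [List.take_take, Nat.min_eq_left h] using h2

theorem le_pvLcp_of_take_eq {xs ys : List Char} {t : Nat} (hl : t ≤ xs.length)
    (h : xs.take t = ys.take t) : t ≤ pvLcp xs ys := by
  
  induction xs generalizing ys t with
  | nil => simp at hl; omega
  | cons a as ih =>
    cases t with
    | zero => omega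
    | succ t' =>
      cases ys with
      | nil => simp at h
      | cons b bs =>
        simp only [List.take_succ_cons, List.cons.injEq] at h
        obtain ⟨hab, htl⟩ := h
        show t' + 1 ≤ (if a = b then pvLcp as bs + 1 else 0)
        rw [if_pos hab]
        have := ih (by simpa using Nat.lt_succ_iff.mp (Nat.lt_of_lt_of_le (Nat.lt_succ_self t') (by simpa using hl)) : t' ≤ as.length) htl
        omega

theorem pyRange_one_nil {a b : Int} (h : b ≤ a) : PySem.List.pyRange a b = [] := by
  
  rw [PySem.List.pyRange_one]
  have : (b - a).toNat = 0 := by omega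
  simp [this]

-- a filter of a unit-step range by an interval condition is again a unit-step range
theorem filter_pyRange_interval (lo hi : Int) : ∀ (a b : Int),
    (PySem.List.pyRange a b).filter (fun i => decide (lo ≤ i ∧ i ≤ hi)) =
      PySem.List.pyRange (max a lo) (min b (hi + 1)) := by
  
  have main : ∀ (c : Nat) (a : Int),
      (PySem.List.pyRange a (a + c)).filter (fun i => decide (lo ≤ i ∧ i ≤ hi)) =
        PySem.List.pyRange (max a lo) (min (a + c) (hi + 1)) := by
    intro c
    induction c with
    | zero =>
      intro a
      rw [pyRange_one_nil (by omega), pyRange_one_nil (by omega)]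
      rfl
    | succ c ih =>
      intro a
      have hcast : ((c + 1 : Nat) : Int) = (c : Int) + 1 := by omega
      rw [hcast, PySem.List.pyRange_one_cons (by omega), List.filter_cons]
      have hrec := ih (a + 1)
      rw [show (a + 1) + (c : Int) = a + ((c : Int) + 1) by omega] at hrec
      by_cases hin : lo ≤ a ∧ a ≤ hi
      · rw [if_pos (by simpa using hin), hrec]
        have e1 : max a lo = a := by omega
        have e2 : max (a + 1) lo = a + 1 := by omega
        rw [e1, e2, PySem.List.pyRange_one_cons
          (show a < min (a + ((c : Int) + 1)) (hi + 1) by omega)]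
      · rw [if_neg (by simpa using hin), hrec]
        by_cases hlo : a < lo
        · have e1 : max a lo = lo := by omega
          have e2 : max (a + 1) lo = lo := by omega
          rw [e1, e2]
        · have hhi : hi < a := by omega
          rw [pyRange_one_nil (by omega), pyRange_one_nil (by omega)]
  intro a b
  by_cases hab : a ≤ b
  · have := main (b - a).toNat a
    rwa [show a + ((b - a).toNat : Int) = b by omega] at this
  · rw [pyRange_one_nil (by omega), pyRange_one_nil (by omega)]
    rfl

-- the heart: deleting the length-(n-m) block starting at k yields mut iff k lies in the interval
theorem pvKey (hl ml : List Char) (hm : ml ≠ []) (k : Nat) (hk : k < hl.length) :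
    (hl.take k ++ PySem.List.slice hl (some ((k : Int) + ((hl.length : Int) - ml.length))) none = ml)
      ↔ ((ml.length : Int) - pvLcp hl.reverse ml.reverse ≤ (k : Int) ∧ (k : Int) ≤ pvLcp hl ml) := by
  
  have hm1 : 1 ≤ ml.length := List.length_pos_iff.mpr hm
  have hs_le : pvLcp hl.reverse ml.reverse ≤ hl.length := by
    simpa using pvLcp_le_left hl.reverse ml.reverse
  have hp_le_n : pvLcp hl ml ≤ hl.length := pvLcp_le_left _ _
  have hp_le_m : pvLcp hl ml ≤ ml.length := pvLcp_le_right _ _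
  by_cases hneg : (k : Int) + ((hl.length : Int) - ml.length) < 0
  · constructor
    · intro h
      exfalso
      have hlen := congrArg List.length h
      have hcl : PySem.List.clampIdx hl.length ((k : Int) + ((hl.length : Int) - ml.length)) =
          hl.length - (ml.length - hl.length - k) := by
        rw [show (k : Int) + ((hl.length : Int) - ml.length) =
              -((ml.length - hl.length - k : Nat) : Int) by omega,
            PySem.List.clampIdx_neg_natCast _ _ (by omega)]
      rw [PySem.List.slice_some_none, hcl, List.length_append, List.length_take,
          List.length_drop] at hlen
      omega
    · intro hx
      obtain ⟨h1, -⟩ := hx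
      exfalso
      omega
  · have hneg' : 0 ≤ (k : Int) + ((hl.length : Int) - ml.length) := by omega
    rw [PySem.List.slice_from hl hneg']
    generalize hj : ((k : Int) + ((hl.length : Int) - ml.length)).toNat = j
    have hjv : (j : Int) = (k : Int) + hl.length - ml.length := by omega
    by_cases hkm : ml.length < k
    · constructor
      · intro h
        exfalso
        have hlen := congrArg List.length h
        rw [List.length_append, List.length_take, List.length_drop] at hlen
        omega
      · intro hx
        obtain ⟨-, h2⟩ := hx
        exfalso
        omega
    · have hkm' : k ≤ ml.length := by omega
      have hjn : j ≤ hl.length := by omega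
      have hnj : hl.length - j = ml.length - k := by omega
      constructor
      · intro h
        have htake : hl.take k = ml.take k := by
          have h2 := congrArg (List.take k) h
          rwa [List.take_left' (by rw [List.length_take]; omega)] at h2
        have hdrop : hl.drop j = ml.drop k := by
          have h2 := congrArg (List.drop k) h
          rwa [List.drop_left' (by rw [List.length_take]; omega)] at h2
        constructor
        · have hrev : hl.reverse.take (ml.length - k) = ml.reverse.take (ml.length - k) := by
            have h2 := congrArg List.reverse hdrop
            rw [List.reverse_drop, List.reverse_drop, hnj] at h2
            exact h2
          have := le_pvLcp_of_take_eq (by rw [List.length_reverse]; omega) hrev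
          omega
        · have := le_pvLcp_of_take_eq (by omega) htake
          omega
      · intro hx
        obtain ⟨h1, h2⟩ := hx
        have hkp : k ≤ pvLcp hl ml := by omega
        have hks : ml.length - k ≤ pvLcp hl.reverse ml.reverse := by omega
        have htake : hl.take k = ml.take k := take_eq_of_le_pvLcp hkp
        have hdrop : hl.drop j = ml.drop k := by
          rw [← List.reverse_inj, List.reverse_drop, List.reverse_drop, hnj]
          exact take_eq_of_le_pvLcp hks
        rw [htake, hdrop]
        exact List.take_append_drop k ml

-- ===== VERDICT (by name: the statement is the Claim_ definition above) =====
theorem insertion_edits_spec : Claim_equal_insertion_edits := by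
  intro mut_ hel pos _
  unfold Spec_insertion_edits
  by_cases hm : mut_ = ""
  · simp only [insertion_edits, insertion_edits_alt, if_pos hm]
  · simp only [insertion_edits, insertion_edits_alt, if_neg hm]
    rw [PySem.List.foldl_append_if, List.nil_append]
    have hml : mut_.toList ≠ [] := fun h => hm (String.toList_inj.mp h)
    have pB : pvLcpGo hel.toList mut_.toList 0 = pvLcp hel.toList mut_.toList := by
      rw [pvLcpGo_eq]; simp
    have sB : pvLcsGo hel.toList mut_.toList 0 =
        pvLcp hel.toList.reverse mut_.toList.reverse := by
      rw [pvLcsGo_eq, pvLcpGo_eq]; simp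
    have hpoint : ∀ i ∈ PySem.List.pyRange 0 (PySem.Str.len hel),
        (PySem.Str.slice hel none (some i) ++
            PySem.Str.slice hel (some (i + (PySem.Str.len hel - PySem.Str.len mut_))) ==
          mut_) =
        decide (max 0 (PySem.Str.len mut_ - (pvLcsGo hel.toList mut_.toList 0 : Int)) ≤ i ∧
          i ≤ min ((pvLcpGo hel.toList mut_.toList 0 : Int)) (PySem.Str.len hel - 1)) := by
      intro i him
      rw [PySem.List.mem_pyRange_one] at him
      obtain ⟨hi0, hin⟩ := him
      rw [PySem.Str.len_eq] at hin
      have hkn : i.toNat < hel.toList.length := by omega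
      have key := pvKey hel.toList mut_.toList hml i.toNat hkn
      rw [Bool.eq_iff_iff, beq_iff_eq, decide_eq_true_eq, ← String.toList_inj,
          String.toList_append, PySem.Str.toList_slice, PySem.Str.toList_slice,
          PySem.Chars.slice_eq_listSlice, PySem.Chars.slice_eq_listSlice,
          PySem.List.slice_to _ hi0, PySem.Str.len_eq, PySem.Str.len_eq, pB, sB]
      rw [show i = ((i.toNat : Nat) : Int) from (Int.toNat_of_nonneg hi0).symm]
      simp only [Int.toNat_natCast]
      rw [key]
      omega
    rw [List.filter_congr hpoint, filter_pyRange_interval]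
    have e1 : max 0 (max 0 (PySem.Str.len mut_ - (pvLcsGo hel.toList mut_.toList 0 : Int))) =
        max 0 (PySem.Str.len mut_ - (pvLcsGo hel.toList mut_.toList 0 : Int)) := by omega
    have e2 : min (PySem.Str.len hel)
          (min ((pvLcpGo hel.toList mut_.toList 0 : Int)) (PySem.Str.len hel - 1) + 1) =
        min ((pvLcpGo hel.toList mut_.toList 0 : Int)) (PySem.Str.len hel - 1) + 1 := by
      rw [PySem.Str.len_eq]
      omega
    rw [e1, e2]
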